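-- pv_equiv track=rewrite | github.com/blopit/Diff-Generator-For-AI | diff_handler.py | parse_code_block
-- ===== SOURCE A (Python) =====
-- def parse_code_block(block_content):
--     """
--     Parse a code block to identify changes.
--     Returns list of tuples: (action, content, context_lines)
--     """
--     changes = []
--     lines = block_content.splitlines()
--     current_section = []
--     in_change_section = False
--
--     # Common markers used by AI to indicate unchanged code
--     context_markers = {
--         '// existing code...',
--         '// ...',
--         '# existing code...',
--         '# ...',
--         '...',
--         '# rest of the file',
--         '// rest of the file',
--     }
--
--     for line in lines:
--         stripped = line.strip()
--         if stripped in context_markers: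
--             if in_change_section and current_section:
--                 # End of a change section, save the accumulated changes
--                 changes.append(('replace', '\n'.join(current_section), 3))
--                 current_section = []
--             in_change_section = False
--         else:
--             # This is actual code to be changed
--             in_change_section = True
--             current_section.append(line)
--
--     # Don't forget any remaining changes
--     if current_section:
--         changes.append(('replace', '\n'.join(current_section), 3))
--
--     return changes
-- ===== SOURCE B (Python) =====
-- def parse_code_block(block_content):
--     """
--     Parse a code block to identify changes.
--     Returns list of tuples: (action, content, context_lines)
--     """
--     context_markers = {
--         '// existing code...',
--         '// ...',
--         '# existing code...',
--         '# ...',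
--         '...',
--         '# rest of the file',
--         '// rest of the file',
--     }
--     changes = []
--     lines = block_content.splitlines()
--     # Repeatedly peel off one marker line or one maximal run of code lines.
--     while lines:
--         if lines[0].strip() in context_markers:
--             lines = lines[1:]
--             continue
--         i = 1
--         while i < len(lines) and lines[i].strip() not in context_markers:
--             i += 1
--         changes.append(('replace', '\n'.join(lines[:i]), 3))
--         lines = lines[i:]
--     return changes
-- ===== Notes on version B (the rewrite author's own statement) =====
-- stated objective: alternative
-- what changed: Replaces A's flag-and-accumulator flush loop with a run-extraction loop: it repeatedly skips a marker line or peels off one maximal run of code lines and emits that run's segment directly, so no in_change_section flag, pending buffer or trailing flush exists.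
import Mathlib
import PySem

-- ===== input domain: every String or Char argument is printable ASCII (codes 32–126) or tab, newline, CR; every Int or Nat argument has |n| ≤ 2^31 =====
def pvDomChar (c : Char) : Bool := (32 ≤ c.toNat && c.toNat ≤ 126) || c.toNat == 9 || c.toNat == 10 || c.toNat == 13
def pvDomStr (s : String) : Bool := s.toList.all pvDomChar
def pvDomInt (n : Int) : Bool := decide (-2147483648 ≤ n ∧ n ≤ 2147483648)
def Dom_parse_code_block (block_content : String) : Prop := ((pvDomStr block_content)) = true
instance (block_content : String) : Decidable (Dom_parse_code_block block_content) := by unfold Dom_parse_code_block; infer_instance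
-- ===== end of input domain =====

-- B replaces A's flag-and-accumulator flush loop with a run-extraction loop (peel one marker line or one
-- maximal run of code lines per step); same return value, alternative structure, no speed claim.

-- ===== PORT A =====
def pvMarkers : List String :=
  ["// existing code...", "// ...", "# existing code...", "# ...", "...",
   "# rest of the file", "// rest of the file"]

-- the for-loop of A as structural recursion over (changes, current_section, in_change_section)
def pvLoopA : List String → List (String × String × Int) → List String → Bool → List (String × String × Int)
  | [], changes, cur, _ =>
      if cur.isEmpty then changes else changes ++ [("replace", PySem.Str.join "\n" cur, 3)]
  | line :: rest, changes, cur, flag =>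
      let stripped := PySem.Str.strip line
      if pvMarkers.contains stripped then
        if flag && !cur.isEmpty then
          pvLoopA rest (changes ++ [("replace", PySem.Str.join "\n" cur, 3)]) [] false
        else
          pvLoopA rest changes cur false
      else
        pvLoopA rest changes (cur ++ [line]) true

def parse_code_block (block_content : String) : List (String × String × Int) :=
  pvLoopA (PySem.Str.splitlines block_content) [] [] false

-- ===== PORT B =====
def pvIsMarker (line : String) : Bool := pvMarkers.contains (PySem.Str.strip line)

-- B's while-loop over the remaining suffix of lines: skip a marker line, or peel one maximal code run
def pvGoB : List String → List (String × String × Int)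
  | [] => []
  | l :: ls =>
      if pvIsMarker l then pvGoB ls
      else
        ("replace", PySem.Str.join "\n" (l :: ls.takeWhile (fun x => !pvIsMarker x)), 3)
          :: pvGoB (ls.dropWhile (fun x => !pvIsMarker x))
  termination_by xs => xs.length
  decreasing_by
    · simp
    · simp only [List.length_cons]
      exact Nat.lt_succ_of_le (List.length_dropWhile_le _ _)

def parse_code_block_alt (block_content : String) : List (String × String × Int) :=
  pvGoB (PySem.Str.splitlines block_content)

-- ===== PRECONDITION & SPEC =====
def Spec_parse_code_block (block_content : String) (out : List (String × String × Int)) : Prop := out = parse_code_block_alt block_content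
instance (block_content : String) (out : List (String × String × Int)) : Decidable (Spec_parse_code_block block_content out) := by unfold Spec_parse_code_block; infer_instance

-- ===== CLAIM (what is proved, stated in full; the proofs are below) =====
def Claim_equal_parse_code_block : Prop := ∀ (block_content : String), Dom_parse_code_block block_content → Spec_parse_code_block block_content (parse_code_block block_content)

-- ===== LEMMAS AND PROOFS =====

-- The loop of A, started with an empty pending section (flag off), appends exactly B's segments;
-- started with a nonempty pending section (flag on), the pending lines extend B's first code run.
theorem pvLoopA_goB (lines : List String) :
    (∀ changes, pvLoopA lines changes [] false = changes ++ pvGoB lines) ∧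
    (∀ changes cur, cur ≠ [] → pvLoopA lines changes cur true =
        changes ++ ("replace",
            PySem.Str.join "\n" (cur ++ lines.takeWhile (fun x => !pvIsMarker x)), 3)
          :: pvGoB (lines.dropWhile (fun x => !pvIsMarker x))) := by
  induction lines with
  | nil =>
      refine ⟨fun changes => by simp [pvLoopA, pvGoB], fun changes cur hcur => ?_⟩
      simp [pvLoopA, pvGoB, hcur]
  | cons l ls ih =>
      constructor
      · intro changes
        rw [pvLoopA, pvGoB]
        by_cases hm : PySem.Str.strip l ∈ pvMarkers
        · simp [pvIsMarker, hm, ih.1 changes]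
        · have hb : pvIsMarker l = false := by simp [pvIsMarker, hm]
          rw [if_neg (by simpa using hm), if_neg (by simp [hb]),
            ih.2 changes ([] ++ [l]) (by simp)]
          simp
      · intro changes cur hcur
        rw [pvLoopA]
        by_cases hm : PySem.Str.strip l ∈ pvMarkers
        · have hb : pvIsMarker l = true := by simp [pvIsMarker, hm]
          rw [if_pos (by simpa using hm),
            if_pos (by simp [hcur]), ih.1]
          simp [pvGoB, hb]
        · have hb : pvIsMarker l = false := by simp [pvIsMarker, hm]
          rw [if_neg (by simpa using hm), ih.2 changes (cur ++ [l]) (by simp)]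
          simp [hb]

-- ===== VERDICT (by name: the statement is the Claim_ definition above) =====
theorem parse_code_block_spec : Claim_equal_parse_code_block := by
  intro block_content _
  unfold Spec_parse_code_block parse_code_block parse_code_block_alt
  simpa using (pvLoopA_goB (PySem.Str.splitlines block_content)).1 []
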